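-- pv_equiv track=rewrite | github.com/SCCapstone/CapstoneBots | blender_vcs/diff.py | compute_scene_diff
-- ===== SOURCE A (Python) =====
-- from enum import Enum
--
-- class ObjectStatus(str, Enum):
--     MODIFIED = "M"
--     ADDED = "+"
--     DELETED = "-"
--
-- def compute_scene_diff(
--     scene_objects: dict[str, str],
--     parent_objects: dict[str, str],
-- ) -> dict[str, ObjectStatus]:
--     """
--     Compare scene objects against parent commit objects.
--
--     Args:
--         scene_objects: {object_name: blob_hash} for current scene
--         parent_objects: {object_name: blob_hash} for parent commit
--
--     Returns:
--         dict mapping object_name -> ObjectStatus for changed objects only.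
--         Unchanged objects are omitted.
--     """
--     diff = {}
--
--     all_names = set(scene_objects.keys()) | set(parent_objects.keys())
--
--     for name in all_names:
--         in_scene = name in scene_objects
--         in_parent = name in parent_objects
--
--         if in_scene and in_parent:
--             if scene_objects[name] != parent_objects[name]:
--                 diff[name] = ObjectStatus.MODIFIED
--             # else: unchanged — omit
--         elif in_scene and not in_parent:
--             diff[name] = ObjectStatus.ADDED
--         elif not in_scene and in_parent:
--             diff[name] = ObjectStatus.DELETED
--
--     return diff
-- ===== SOURCE B (Python) =====
-- from enum import Enum
--
-- class ObjectStatus(str, Enum):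
--     MODIFIED = "M"
--     ADDED = "+"
--     DELETED = "-"
--
-- def compute_scene_diff(
--     scene_objects: dict[str, str],
--     parent_objects: dict[str, str],
-- ) -> dict[str, "ObjectStatus"]:
--     # Set algebra on (name, hash) PAIRS: a pair present in only one side is
--     # exactly a changed object; unchanged pairs cancel and are never visited.
--     scene_items = set(scene_objects.items())
--     parent_items = set(parent_objects.items())
--     diff = {}
--     for name, _ in scene_items - parent_items:      # added or modified
--         diff[name] = ObjectStatus.MODIFIED if name in parent_objects else ObjectStatus.ADDED
--     for name, _ in parent_items - scene_items:      # modified (skip) or deleted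
--         if name not in scene_objects:
--             diff[name] = ObjectStatus.DELETED
--     return diff
-- ===== Notes on version B (the rewrite author's own statement) =====
-- stated objective: alternative
-- what changed: B works by set algebra on (name, hash) PAIRS instead of per-key comparison: the asymmetric differences of the two item-pair sets are exactly the changed objects, so unchanged pairs cancel and are never classified; each pair in scene-parent is ADDED or MODIFIED by one membership test, each pair in parent-scene with its key absent from scene is DELETED.
import Mathlib
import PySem

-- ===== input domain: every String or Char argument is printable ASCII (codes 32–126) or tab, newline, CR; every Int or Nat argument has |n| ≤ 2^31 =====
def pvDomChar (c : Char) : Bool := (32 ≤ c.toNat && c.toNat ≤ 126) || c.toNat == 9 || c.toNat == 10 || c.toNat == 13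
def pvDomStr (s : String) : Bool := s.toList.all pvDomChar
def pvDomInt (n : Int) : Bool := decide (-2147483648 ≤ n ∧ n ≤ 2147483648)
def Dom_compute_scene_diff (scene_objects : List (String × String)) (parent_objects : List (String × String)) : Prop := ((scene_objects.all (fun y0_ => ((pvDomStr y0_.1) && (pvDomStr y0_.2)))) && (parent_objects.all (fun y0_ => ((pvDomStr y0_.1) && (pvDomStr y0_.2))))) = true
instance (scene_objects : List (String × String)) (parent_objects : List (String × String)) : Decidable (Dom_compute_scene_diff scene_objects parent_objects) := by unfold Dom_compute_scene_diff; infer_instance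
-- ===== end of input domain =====

-- B classifies via set algebra on (name, hash) pairs (the asymmetric differences of the item sets are exactly the changed objects) instead of A's per-key union loop; equivalence is about the returned dict.

-- ===== PORT A =====
-- Literal port of A: build the union set of key names, then one loop with dual membership tests.
def compute_scene_diff (scene_objects : List (String × String)) (parent_objects : List (String × String)) : List (String × String) :=
  let sd : PySem.Dict String String := PySem.Dict.mk scene_objects
  let pd : PySem.Dict String String := PySem.Dict.mk parent_objects
  let all_names : PySem.Set String :=
    PySem.Set.union (PySem.Set.ofList sd.keys) (PySem.Set.ofList pd.keys)
  let diff : PySem.Dict String String :=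
    all_names.foldl (fun d name =>
      let in_scene := sd.contains name
      let in_parent := pd.contains name
      if in_scene && in_parent then
        if sd.getD name "" ≠ pd.getD name "" then d.insert name "M" else d
      else if in_scene && !in_parent then d.insert name "+"
      else if !in_scene && in_parent then d.insert name "-"
      else d) PySem.Dict.empty
  diff.items

-- ===== PORT B =====
-- Literal port of B: item-pair sets; scene∖parent pairs become ADDED/MODIFIED, parent∖scene pairs with key absent from scene become DELETED.
def compute_scene_diff_alt (scene_objects : List (String × String)) (parent_objects : List (String × String)) : List (String × String) :=
  let sd : PySem.Dict String String := PySem.Dict.mk scene_objects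
  let pd : PySem.Dict String String := PySem.Dict.mk parent_objects
  let scene_items : PySem.Set (String × String) := PySem.Set.ofList sd.items
  let parent_items : PySem.Set (String × String) := PySem.Set.ofList pd.items
  let d1 : PySem.Dict String String :=
    (PySem.Set.diff scene_items parent_items).foldl (fun d p =>
      d.insert p.1 (if pd.contains p.1 then "M" else "+")) PySem.Dict.empty
  let d2 : PySem.Dict String String :=
    (PySem.Set.diff parent_items scene_items).foldl (fun d p =>
      if !(sd.contains p.1) then d.insert p.1 "-" else d) d1
  d2.items

-- ===== PRECONDITION & SPEC =====
-- Pre_ requires each association list to have pairwise-distinct keys: the Python arguments are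
-- dicts, so a duplicate-key list encodes no Python input (no input A returns on is excluded).
def Pre_compute_scene_diff (scene_objects : List (String × String)) (parent_objects : List (String × String)) : Prop :=
  (scene_objects.map Prod.fst).Nodup ∧ (parent_objects.map Prod.fst).Nodup
instance (scene_objects : List (String × String)) (parent_objects : List (String × String)) : Decidable (Pre_compute_scene_diff scene_objects parent_objects) := by unfold Pre_compute_scene_diff; infer_instance

def pvWitness_compute_scene_diff : (List (String × String)) × (List (String × String)) :=
  ([("cube", "h1"), ("lamp", "h2")], [("cube", "h9"), ("plane", "h3")])

def Spec_compute_scene_diff (scene_objects : List (String × String)) (parent_objects : List (String × String)) (out : List (String × String)) : Prop := out = compute_scene_diff_alt scene_objects parent_objects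
instance (scene_objects : List (String × String)) (parent_objects : List (String × String)) (out : List (String × String)) : Decidable (Spec_compute_scene_diff scene_objects parent_objects out) := by unfold Spec_compute_scene_diff; infer_instance

-- ===== CLAIM (what is proved, stated in full; the proofs are below) =====
def Claim_equal_compute_scene_diff : Prop := ∀ (scene_objects : List (String × String)) (parent_objects : List (String × String)), Dom_compute_scene_diff scene_objects parent_objects → Pre_compute_scene_diff scene_objects parent_objects → Spec_compute_scene_diff scene_objects parent_objects (compute_scene_diff scene_objects parent_objects)

-- ===== LEMMAS AND PROOFS =====

-- The per-name status decision, as a function of the two lookups.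
def pvStatus (sd pd : PySem.Dict String String) (n : String) : Option String :=
  match sd.get? n, pd.get? n with
  | some sv, some pv => if sv ≠ pv then some "M" else none
  | some _, none => some "+"
  | none, some _ => some "-"
  | none, none => none

def pvStep (sd pd : PySem.Dict String String) (d : PySem.Dict String String) (n : String) : PySem.Dict String String :=
  match pvStatus sd pd n with
  | some v => d.insert n v
  | none => d

-- A's loop body equals pvStep.
theorem stepA_eq (sd pd : PySem.Dict String String) (d : PySem.Dict String String) (n : String) :
    (if sd.contains n && pd.contains n then
        if sd.getD n "" ≠ pd.getD n "" then d.insert n "M" else d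
      else if sd.contains n && !pd.contains n then d.insert n "+"
      else if !(sd.contains n) && pd.contains n then d.insert n "-"
      else d) = pvStep sd pd d n := by
  unfold pvStep pvStatus
  rw [PySem.Dict.contains_eq_isSome_get? (d := sd), PySem.Dict.contains_eq_isSome_get? (d := pd)]
  rcases hs : sd.get? n with _ | sv <;> rcases hp : pd.get? n with _ | pv <;>
    simp [PySem.Dict.getD_eq_get?_getD, hs, hp]
  by_cases hvv : sv = pv <;> simp [hvv]

-- Folding pvStep over fresh, pairwise-distinct names appends the filterMapped statuses.
theorem foldl_pvStep_items (sd pd : PySem.Dict String String) :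
    ∀ (L : List String) (d : PySem.Dict String String), L.Nodup →
      (∀ n ∈ L, d.contains n = false) →
      (L.foldl (pvStep sd pd) d).items
        = d.items ++ L.filterMap (fun n => (pvStatus sd pd n).map (fun v => (n, v))) := by
  intro L
  induction L with
  | nil => intro d _ _; simp
  | cons n L ih =>
    intro d hnd hfresh
    have hdn : d.contains n = false := hfresh n (by simp)
    have hstep : ∀ m ∈ L, (pvStep sd pd d n).contains m = false := by
      intro m hm
      have hmn : m ≠ n := by
        rcases List.nodup_cons.1 hnd with ⟨hnotin, _⟩
        intro h; exact hnotin (h ▸ hm)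
      unfold pvStep
      rcases hst : pvStatus sd pd n with _ | v
      · exact hfresh m (by simp [hm])
      · rw [PySem.Dict.contains_insert]
        simp [hmn, hfresh m (by simp [hm])]
    have hitems : (pvStep sd pd d n).items
        = d.items ++ ((pvStatus sd pd n).map (fun v => (n, v))).toList := by
      unfold pvStep
      rcases hst : pvStatus sd pd n with _ | v
      · simp
      · simp [PySem.Dict.items_insert_of_not_contains _ _ hdn]
    calc ((n :: L).foldl (pvStep sd pd) d).items
        = (L.foldl (pvStep sd pd) (pvStep sd pd d n)).items := by simp
      _ = (pvStep sd pd d n).items ++ L.filterMap (fun n => (pvStatus sd pd n).map (fun v => (n, v))) :=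
          ih _ (List.nodup_cons.1 hnd).2 hstep
      _ = _ := by
          rw [hitems]
          rcases hst : pvStatus sd pd n with _ | v <;> simp [hst]

-- Set.update on a duplicate-free list appends the genuinely new elements.
theorem set_update_eq (s : PySem.Set String) :
    ∀ (xs : List String), xs.Nodup →
      PySem.Set.update s xs = s ++ xs.filter (fun x => !decide (x ∈ s)) := by
  intro xs
  induction xs generalizing s with
  | nil => intro _; simp [PySem.Set.update]
  | cons x xs ih =>
    intro hnd
    rcases List.nodup_cons.1 hnd with ⟨hx, hnd'⟩
    show PySem.Set.update (PySem.Set.add s x) xs = _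
    by_cases hm : x ∈ s
    · have hadd : PySem.Set.add s x = s := by
        simp [PySem.Set.add, PySem.Set.contains, hm]
      rw [hadd, ih s hnd', List.filter_cons]
      simp [hm]
    · have hadd : PySem.Set.add s x = s ++ [x] := by
        simp [PySem.Set.add, PySem.Set.contains, hm]
      rw [hadd, ih (s ++ [x]) hnd', List.filter_cons]
      have hfc : xs.filter (fun y => !decide (y ∈ s ++ [x])) = xs.filter (fun y => !decide (y ∈ s)) := by
        apply List.filter_congr
        intro y hy
        have hyx : y ≠ x := fun h => hx (h ▸ hy)
        simp [List.mem_append, hyx]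
      rw [hfc]
      simp [hm]

theorem set_ofList_nodup (xs : List String) (h : xs.Nodup) : PySem.Set.ofList xs = xs := by
  have := set_update_eq (PySem.Set.empty : PySem.Set String) xs h
  simpa [PySem.Set.ofList, PySem.Set.update, PySem.Set.empty] using this

-- A fold inserting a fresh key per pair appends the mapped pairs.
theorem foldl_insert_items (g : String × String → String) :
    ∀ (L : List (String × String)) (d : PySem.Dict String String),
      (L.map Prod.fst).Nodup → (∀ p ∈ L, d.contains p.1 = false) →
      (L.foldl (fun d p => d.insert p.1 (g p)) d).items
        = d.items ++ L.map (fun p => (p.1, g p)) := by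
  intro L
  induction L with
  | nil => intro d _ _; simp
  | cons p L ih =>
    intro d hnd hfresh
    have hdp : d.contains p.1 = false := hfresh p (by simp)
    rw [List.map_cons, List.nodup_cons] at hnd
    obtain ⟨hnotin, hnd'⟩ := hnd
    have hstep : ∀ q ∈ L, (d.insert p.1 (g p)).contains q.1 = false := by
      intro q hq
      have hqp : q.1 ≠ p.1 := fun h => hnotin (h ▸ List.mem_map_of_mem hq)
      rw [PySem.Dict.contains_insert]
      simp [hqp, hfresh q (by simp [hq])]
    have : ((p :: L).foldl (fun d p => d.insert p.1 (g p)) d)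
        = L.foldl (fun d p => d.insert p.1 (g p)) (d.insert p.1 (g p)) := by simp
    rw [this, ih _ hnd' hstep, PySem.Dict.items_insert_of_not_contains _ _ hdp]
    simp

-- A guarded fold is a fold over the filtered list.
theorem foldl_guard {α β : Type} (c : α → Bool) (f : β → α → β) :
    ∀ (L : List α) (d : β),
      L.foldl (fun d x => if c x then f d x else d) d = (L.filter c).foldl f d := by
  intro L
  induction L with
  | nil => intro d; simp
  | cons x L ih =>
    intro d
    by_cases hx : c x = true <;> simp [hx, ih]

-- filterMap with an if-guard is filter-then-map.
theorem filterMap_guard {α β : Type} (c : α → Bool) (g : α → β) :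
    ∀ (L : List α),
      L.filterMap (fun x => if c x then none else some (g x))
        = (L.filter (fun x => !c x)).map g := by
  intro L
  induction L with
  | nil => simp
  | cons x L ih =>
    by_cases hx : c x = true <;> simp [List.filter_cons, hx, ih]

-- ===== VERDICT (by name: the statement is the Claim_ definition above) =====
theorem compute_scene_diff_spec : Claim_equal_compute_scene_diff := by
  intro scene parent _hdom hpre
  rcases hpre with ⟨hS, hP⟩
  unfold Spec_compute_scene_diff
  have hAdef : compute_scene_diff scene parent
      = ((PySem.Set.union (PySem.Set.ofList (PySem.Dict.mk scene).keys)
            (PySem.Set.ofList (PySem.Dict.mk parent : PySem.Dict String String).keys)).foldl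
          (fun d name =>
            let in_scene := (PySem.Dict.mk scene : PySem.Dict String String).contains name
            let in_parent := (PySem.Dict.mk parent : PySem.Dict String String).contains name
            if in_scene && in_parent then
              if (PySem.Dict.mk scene : PySem.Dict String String).getD name ""
                  ≠ (PySem.Dict.mk parent : PySem.Dict String String).getD name "" then d.insert name "M" else d
            else if in_scene && !in_parent then d.insert name "+"
            else if !in_scene && in_parent then d.insert name "-"
            else d) PySem.Dict.empty).items := rfl
  have hBdef : compute_scene_diff_alt scene parent
      = (((PySem.Set.diff (PySem.Set.ofList (PySem.Dict.mk parent : PySem.Dict String String).items)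
            (PySem.Set.ofList (PySem.Dict.mk scene : PySem.Dict String String).items)).foldl
          (fun d p => if !((PySem.Dict.mk scene : PySem.Dict String String).contains p.1)
              then d.insert p.1 "-" else d)
          ((PySem.Set.diff (PySem.Set.ofList (PySem.Dict.mk scene : PySem.Dict String String).items)
              (PySem.Set.ofList (PySem.Dict.mk parent : PySem.Dict String String).items)).foldl
            (fun d p =>
              d.insert p.1 (if (PySem.Dict.mk parent : PySem.Dict String String).contains p.1 then "M" else "+"))
            PySem.Dict.empty))).items := rfl
  rw [hAdef, hBdef]
  set sd : PySem.Dict String String := PySem.Dict.mk scene with hsd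
  set pd : PySem.Dict String String := PySem.Dict.mk parent with hpd
  have hkS : sd.keys = scene.map Prod.fst := rfl
  have hkP : pd.keys = parent.map Prod.fst := rfl
  have hSnd : sd.keys.Nodup := by rw [hkS]; exact hS
  have hPnd : pd.keys.Nodup := by rw [hkP]; exact hP
  have hkiS : sd.keys = sd.items.map Prod.fst := rfl
  have hkiP : pd.keys = pd.items.map Prod.fst := rfl
  have hSind : sd.items.Nodup := List.Nodup.of_map Prod.fst (by rw [← hkiS]; exact hSnd)
  have hPind : pd.items.Nodup := List.Nodup.of_map Prod.fst (by rw [← hkiP]; exact hPnd)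
  -- normalise A's union set
  have hunion : PySem.Set.union (PySem.Set.ofList sd.keys) (PySem.Set.ofList pd.keys)
      = sd.keys ++ pd.keys.filter (fun x => !decide (x ∈ sd.keys)) := by
    rw [set_ofList_nodup _ hSnd, set_ofList_nodup _ hPnd]
    exact set_update_eq _ _ hPnd
  set F : List String := pd.keys.filter (fun x => !decide (x ∈ sd.keys)) with hF
  have hFP : ∀ n ∈ F, n ∈ pd.keys ∧ n ∉ sd.keys := by
    intro n hn
    rw [hF, List.mem_filter] at hn
    exact ⟨hn.1, by simpa using hn.2⟩
  have hLnd : (sd.keys ++ F).Nodup := by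
    refine List.Nodup.append hSnd (List.Nodup.filter _ hPnd) ?_
    intro a ha haF
    exact (hFP a haF).2 ha
  -- A's fold is a pvStep fold
  have hA : (PySem.Set.union (PySem.Set.ofList sd.keys) (PySem.Set.ofList pd.keys)).foldl
      (fun d name =>
        let in_scene := sd.contains name
        let in_parent := pd.contains name
        if in_scene && in_parent then
          if sd.getD name "" ≠ pd.getD name "" then d.insert name "M" else d
        else if in_scene && !in_parent then d.insert name "+"
        else if !in_scene && in_parent then d.insert name "-"
        else d) PySem.Dict.empty
      = (sd.keys ++ F).foldl (pvStep sd pd) PySem.Dict.empty := by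
    rw [hunion]
    exact PySem.List.foldl_congr_mem _ _ _ _ (fun d n _ => stepA_eq sd pd d n)
  rw [hA]
  have hfreshe : ∀ (L : List String), ∀ n ∈ L, (PySem.Dict.empty : PySem.Dict String String).contains n = false :=
    fun _ n _ => PySem.Dict.contains_empty n
  have hAitems := foldl_pvStep_items sd pd (sd.keys ++ F) PySem.Dict.empty hLnd (hfreshe _)
  -- the deleted tail of A
  have hFst : ∀ n ∈ F, (pvStatus sd pd n).map (fun v => (n, v)) = some (n, "-") := by
    intro n hn
    rcases hFP n hn with ⟨hnp, hns⟩
    have h1 : sd.get? n = none := (PySem.Dict.get?_eq_none_iff_not_mem_keys _ _).2 hns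
    have h2 : (pd.get? n).isSome := by
      rw [← PySem.Dict.contains_eq_isSome_get?]
      exact (PySem.Dict.contains_iff_mem_keys _ _).2 hnp
    rcases ho : pd.get? n with _ | v
    · rw [ho] at h2; simp at h2
    · unfold pvStatus
      rw [h1, ho]
      rfl
  have hFmap : F.filterMap (fun n => (pvStatus sd pd n).map (fun v => (n, v)))
      = F.map (fun n => (n, "-")) := by
    rw [List.filterMap_congr (g := some ∘ (fun n => (n, "-"))) (fun n hn => hFst n hn)]
    exact congrFun List.filterMap_eq_map F
  -- B: normalise the two difference sets to filters
  have hdiffSP : PySem.Set.diff (PySem.Set.ofList sd.items) (PySem.Set.ofList pd.items)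
      = sd.items.filter (fun p => !(PySem.Set.contains (PySem.Set.ofList pd.items) p)) := by
    rw [PySem.Set.ofList_eq_self_of_nodup _ hSind]
    rfl
  have hdiffPS : PySem.Set.diff (PySem.Set.ofList pd.items) (PySem.Set.ofList sd.items)
      = pd.items.filter (fun p => !(PySem.Set.contains (PySem.Set.ofList sd.items) p)) := by
    rw [PySem.Set.ofList_eq_self_of_nodup _ hPind]
    rfl
  set L1 : List (String × String) := sd.items.filter (fun p => !(PySem.Set.contains (PySem.Set.ofList pd.items) p)) with hL1
  -- B's first fold: appended mapped pairs
  have hL1nd : (L1.map Prod.fst).Nodup := by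
    have hsub : L1.Sublist sd.items := List.filter_sublist
    exact ((hsub.map Prod.fst).nodup (by rw [← hkiS]; exact hSnd))
  have hd1 := foldl_insert_items (fun p => if pd.contains p.1 then "M" else "+") L1
      PySem.Dict.empty hL1nd (fun p _ => PySem.Dict.contains_empty p.1)
  -- B's first fold result equals A's scene-part filterMap
  have hSceneEq : L1.map (fun p => (p.1, if pd.contains p.1 then "M" else "+"))
      = sd.keys.filterMap (fun n => (pvStatus sd pd n).map (fun v => (n, v))) := by
    have hcomp : sd.keys.filterMap (fun n => (pvStatus sd pd n).map (fun v => (n, v)))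
        = sd.items.filterMap (fun p => (pvStatus sd pd p.1).map (fun v => (p.1, v))) := by
      rw [hkiS, List.filterMap_map]
      rfl
    have hmemiff : ∀ p ∈ sd.items,
        (pvStatus sd pd p.1).map (fun v => (p.1, v))
          = (if PySem.Set.contains (PySem.Set.ofList pd.items) p then none
             else some (p.1, if pd.contains p.1 then "M" else "+")) := by
      intro p hp
      obtain ⟨n, w⟩ := p
      have hg : sd.get? n = some w := PySem.Dict.get?_of_mem_items _ hp hSnd
      unfold pvStatus
      rcases ho : pd.get? n with _ | v
      · have hnp : (n, w) ∉ pd.items := by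
          intro hmempd
          have := PySem.Dict.get?_of_mem_items _ hmempd hPnd
          rw [ho] at this; simp at this
        have hc : pd.contains n = false := by
          rw [PySem.Dict.contains_eq_isSome_get?, ho]; rfl
        simp [hg, ho, hc, hnp]
      · have hc : pd.contains n = true := by
          rw [PySem.Dict.contains_eq_isSome_get?, ho]; rfl
        have hpm : (n, w) ∈ pd.items ↔ w = v := by
          constructor
          · intro hmempd
            have := PySem.Dict.get?_of_mem_items _ hmempd hPnd
            rw [ho] at this; exact (Option.some.inj this).symm
          · intro hv
            have hgv : pd.get? n = some w := by rw [ho, hv]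
            exact PySem.Dict.mem_items_of_get?_eq_some _ hgv
        by_cases hv : w = v
        · subst hv
          have hmm : (n, w) ∈ pd.items := hpm.2 rfl
          simp [hg, hmm]
        · have hnm : (n, w) ∉ pd.items := fun h => hv (hpm.1 h)
          simp [hg, hv, hc, hnm]
    rw [hcomp,
      List.filterMap_congr hmemiff,
      filterMap_guard (fun p => PySem.Set.contains (PySem.Set.ofList pd.items) p)
        (fun p => (p.1, if pd.contains p.1 then "M" else "+"))]
  -- B's second fold: filter out guarded pairs, then plain insert fold
  have hB2filter : (pd.items.filter (fun p => !(PySem.Set.contains (PySem.Set.ofList sd.items) p))).filter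
      (fun p => !(sd.contains p.1))
      = pd.items.filter (fun p => !(sd.contains p.1)) := by
    rw [List.filter_filter]
    apply List.filter_congr
    intro p hp
    by_cases hc : sd.contains p.1 = true
    · simp [hc]
    · have hns : p ∉ sd.items := by
        intro hmem
        exact hc ((PySem.Dict.contains_iff_mem_keys _ _).2 (by rw [hkiS]; exact List.mem_map_of_mem hmem))
      have hc' : sd.contains p.1 = false := by simpa using hc
      simp [hc', hns]
  set L2 : List (String × String) := pd.items.filter (fun p => !(sd.contains p.1)) with hL2
  have hL2nd : (L2.map Prod.fst).Nodup :=
    ((List.filter_sublist.map Prod.fst).nodup (by rw [← hkiP]; exact hPnd))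
  -- the keys of B's first-fold result all lie in scene's keys; L2's keys do not
  have hd1keys : ∀ n, ((L1.foldl (fun d p => d.insert p.1 (if pd.contains p.1 then "M" else "+")) PySem.Dict.empty).contains n = true) → n ∈ sd.keys := by
    intro n hn
    rw [PySem.Dict.contains_iff_mem_keys] at hn
    have hn' : n ∈ ((L1.foldl (fun d p => d.insert p.1 (if pd.contains p.1 then "M" else "+")) PySem.Dict.empty)).items.map Prod.fst := hn
    rw [hd1] at hn'
    simp only [PySem.Dict.empty] at hn'
    have hn2 : ∃ x, (n, x) ∈ L1 := by simpa using hn'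
    obtain ⟨v, hv⟩ := hn2
    rw [hkiS]
    exact List.mem_map_of_mem (List.mem_of_mem_filter hv)
  have hfresh2 : ∀ p ∈ L2, (L1.foldl (fun d q => d.insert q.1 (if pd.contains q.1 then "M" else "+")) PySem.Dict.empty).contains p.1 = false := by
    intro p hp
    have hcs : sd.contains p.1 = false := by
      have := (List.mem_filter.1 (hL2 ▸ hp)).2
      simpa using this
    by_cases hc : (L1.foldl (fun d q => d.insert q.1 (if pd.contains q.1 then "M" else "+")) PySem.Dict.empty).contains p.1 = true
    · exfalso
      have := hd1keys p.1 hc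
      rw [← PySem.Dict.contains_iff_mem_keys] at this
      rw [hcs] at this; exact Bool.noConfusion this
    · simpa using hc
  have hd2 := foldl_insert_items (fun _ => "-") L2
      (L1.foldl (fun d p => d.insert p.1 (if pd.contains p.1 then "M" else "+")) PySem.Dict.empty)
      hL2nd hfresh2
  -- L2 key list is exactly F
  have hL2F : L2.map (fun p => ((p.1 : String), ("-" : String))) = F.map (fun n => (n, "-")) := by
    rw [hL2, hF]
    have : pd.items.filter (fun p => !(sd.contains p.1))
        = pd.items.filter (fun p => !decide (p.1 ∈ sd.keys)) := by
      apply List.filter_congr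
      intro p _
      rw [PySem.Dict.contains_eq_decide_mem_keys]
    rw [this, hkiP, List.filter_map, List.map_map]
    rfl
  -- assemble
  have hguard : ∀ (L : List (String × String)) (d : PySem.Dict String String),
      L.foldl (fun d p => if !(sd.contains p.1) then d.insert p.1 "-" else d) d
        = (L.filter (fun p => !(sd.contains p.1))).foldl (fun d p => d.insert p.1 "-") d :=
    fun L d => foldl_guard _ _ L d
  rw [hAitems, hdiffSP, hdiffPS, hguard, hB2filter,
    hd2, hd1, hSceneEq, List.filterMap_append, hFmap, hL2F]
  simp [PySem.Dict.empty]
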